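-- pv_equiv track=rewrite | github.com/TheExGenesis/birdseye | src/components/tweet_view.py | count_consecutive_self_tweets
-- ===== SOURCE A (Python) =====
-- def count_consecutive_self_tweets(thread_data, thread_tweets):
--     """Count longest streak of consecutive tweets by the original author"""
--     if not thread_data:
--         return 0
--
--     root_tweet = thread_tweets.get(thread_data[0], {})
--     root_user = str(root_tweet.get("username", "")).lower().strip() or "unknown"
--
--     max_streak = current_streak = 0
--
--     for tweet_id in thread_data:
--         tweet = thread_tweets.get(tweet_id, {})
--         tweet_user = str(tweet.get("username", "")).lower().strip() or "unknown"
--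
--         if tweet_user == root_user:
--             current_streak += 1
--             max_streak = max(max_streak, current_streak)
--         else:
--             current_streak = 0
--
--     return max_streak
-- ===== SOURCE B (Python) =====
-- def count_consecutive_self_tweets(thread_data, thread_tweets):
--     """Count longest streak of consecutive tweets by the original author"""
--     if not thread_data:
--         return 0
--
--     users = [
--         (str(thread_tweets.get(tid, {}).get("username", "")).lower().strip() or "unknown")
--         for tid in thread_data
--     ]
--     root = users[0]
--
--     best = 0
--     i, n = 0, len(users)
--     while i < n:
--         j = i
--         while j < n and users[j] == users[i]:
--             j += 1
--         if users[i] == root: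
--             best = max(best, j - i)
--         i = j
--     return best
-- ===== Notes on version B (the rewrite author's own statement) =====
-- stated objective: alternative
-- what changed: Replaced A's running-counter-with-reset fold by a precompute-the-normalized-username-list pass followed by a run-by-run (two-pointer) scan that takes the max length over maximal runs equal to the root user.
import Mathlib
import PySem

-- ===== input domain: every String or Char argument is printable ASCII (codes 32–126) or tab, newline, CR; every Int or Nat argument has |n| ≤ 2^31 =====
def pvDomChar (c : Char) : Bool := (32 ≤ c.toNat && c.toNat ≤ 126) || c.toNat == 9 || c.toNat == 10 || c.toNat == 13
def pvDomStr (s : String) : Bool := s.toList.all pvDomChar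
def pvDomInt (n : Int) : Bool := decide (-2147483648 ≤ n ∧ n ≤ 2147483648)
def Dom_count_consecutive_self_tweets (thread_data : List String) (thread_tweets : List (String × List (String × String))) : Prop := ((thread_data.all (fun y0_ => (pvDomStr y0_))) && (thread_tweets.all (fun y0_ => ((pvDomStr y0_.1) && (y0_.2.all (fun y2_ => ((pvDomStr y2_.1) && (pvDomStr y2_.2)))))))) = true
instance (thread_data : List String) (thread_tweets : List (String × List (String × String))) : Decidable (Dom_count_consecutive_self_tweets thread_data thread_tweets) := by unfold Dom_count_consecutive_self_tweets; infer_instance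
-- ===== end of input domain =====

-- B rewrites A's running-counter-with-reset loop as a precompute-the-username-list then
-- run-by-run scan (alternative decomposition, same cost); equivalence of return values is proved below.

-- ===== PORT A =====
-- str(thread_tweets.get(tid, {}).get("username", "")).lower().strip() or "unknown"
def pvUserA (thread_tweets : List (String × List (String × String))) (tid : String) : String :=
  let tweet := PySem.Dict.getD (PySem.Dict.mk thread_tweets) tid []
  let u := PySem.Str.strip (PySem.Str.lower (PySem.Dict.getD (PySem.Dict.mk tweet) "username" ""))
  if u = "" then "unknown" else u

def count_consecutive_self_tweets (thread_data : List String) (thread_tweets : List (String × List (String × String))) : Int :=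
  match thread_data with
  | [] => 0
  | t0 :: _ =>
    let root_user := pvUserA thread_tweets t0
    -- for tweet_id in thread_data: state = (max_streak, current_streak)
    let st := thread_data.foldl (fun (st : Int × Int) tweet_id =>
      let tweet_user := pvUserA thread_tweets tweet_id
      if tweet_user = root_user then (max st.1 (st.2 + 1), st.2 + 1) else (st.1, 0)) (0, 0)
    st.1

-- ===== PORT B =====
-- same normalization expression, written by B itself
def pvUserB (thread_tweets : List (String × List (String × String))) (tid : String) : String :=
  let tweet := PySem.Dict.getD (PySem.Dict.mk thread_tweets) tid []
  let u := PySem.Str.strip (PySem.Str.lower (PySem.Dict.getD (PySem.Dict.mk tweet) "username" ""))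
  if u = "" then "unknown" else u

-- the two-pointer while loop of Source B: consume one maximal run of equal usernames per step
def pvBestRuns (root : String) (users : List String) (best : Int) : Int :=
  match users with
  | [] => best
  | u :: rest =>
    let run := rest.takeWhile (fun x => x == u)
    let best' := if u = root then max best (1 + (run.length : Int)) else best
    pvBestRuns root (rest.dropWhile (fun x => x == u)) best'
termination_by users.length
decreasing_by
  simp only [List.length_cons]
  exact Nat.lt_succ_of_le (List.length_dropWhile_le _ _)

def count_consecutive_self_tweets_alt (thread_data : List String) (thread_tweets : List (String × List (String × String))) : Int :=
  match thread_data with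
  | [] => 0
  | t0 :: _ =>
    let users := thread_data.map (pvUserB thread_tweets)
    pvBestRuns (pvUserB thread_tweets t0) users 0

-- ===== PRECONDITION & SPEC =====
def Spec_count_consecutive_self_tweets (thread_data : List String) (thread_tweets : List (String × List (String × String))) (out : Int) : Prop := out = count_consecutive_self_tweets_alt thread_data thread_tweets
instance (thread_data : List String) (thread_tweets : List (String × List (String × String))) (out : Int) : Decidable (Spec_count_consecutive_self_tweets thread_data thread_tweets out) := by unfold Spec_count_consecutive_self_tweets; infer_instance

-- ===== CLAIM (what is proved, stated in full; the proofs are below) =====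
def Claim_equal_count_consecutive_self_tweets : Prop := ∀ (thread_data : List String) (thread_tweets : List (String × List (String × String))), Dom_count_consecutive_self_tweets thread_data thread_tweets → Spec_count_consecutive_self_tweets thread_data thread_tweets (count_consecutive_self_tweets thread_data thread_tweets)

-- ===== LEMMAS AND PROOFS =====

-- A's loop as a direct recursion on the list of (already normalized) usernames
def pvLoopA (root : String) (m c : Int) : List String → Int
  | [] => m
  | u :: rest => if u = root then pvLoopA root (max m (c + 1)) (c + 1) rest else pvLoopA root m 0 rest

theorem pvFoldl_eq_loopA (root : String) (users : List String) : ∀ m c : Int,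
    (users.foldl (fun (st : Int × Int) u =>
      if u = root then (max st.1 (st.2 + 1), st.2 + 1) else (st.1, 0)) (m, c)).1
      = pvLoopA root m c users := by
  induction users with
  | nil => intro m c; rfl
  | cons u rest ih =>
    intro m c
    simp only [List.foldl_cons, pvLoopA]
    by_cases h : u = root <;> simp [h, ih]

-- consuming a run of elements all equal to root
theorem pvLoopA_run_root (root : String) : ∀ (l : List String), (∀ x ∈ l, x = root) →
    ∀ (m c : Int) (t : List String),
    pvLoopA root (max m c) c (l ++ t) = pvLoopA root (max m (c + l.length)) (c + l.length) t := by
  intro l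
  induction l with
  | nil => intro _ m c t; simp
  | cons x l' ih =>
    intro h m c t
    have hx : x = root := h x (by simp)
    have hl' : ∀ y ∈ l', y = root := fun y hy => h y (by simp [hy])
    simp only [List.cons_append, pvLoopA, hx, if_pos]
    have h1 : max (max m c) (c + 1) = max m (c + 1) := by omega
    rw [h1, show max m (c + 1) = max m (c + 1) from rfl]
    have := ih hl' m (c + 1) t
    rw [this]
    have h2 : c + 1 + (l'.length : Int) = c + ((l'.length : Int) + 1) := by omega
    simp only [List.length_cons]
    push_cast
    rw [h2]

-- consuming a run of elements all different from root (with current streak 0)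
theorem pvLoopA_run_skip (root : String) : ∀ (l : List String), (∀ x ∈ l, x ≠ root) →
    ∀ (m : Int) (t : List String), pvLoopA root m 0 (l ++ t) = pvLoopA root m 0 t := by
  intro l
  induction l with
  | nil => intro _ m t; rfl
  | cons x l' ih =>
    intro h m t
    have hx : x ≠ root := h x (by simp)
    simp only [List.cons_append, pvLoopA, if_neg hx]
    exact ih (fun y hy => h y (by simp [hy])) m t

-- the current-streak argument is irrelevant when the next element (if any) is not root
theorem pvLoopA_reset (root : String) (d : List String)
    (hd : d = [] ∨ ∃ v d', d = v :: d' ∧ v ≠ root) (m c : Int) :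
    pvLoopA root m c d = pvLoopA root m 0 d := by
  rcases hd with h | ⟨v, d', rfl, hv⟩
  · subst h; rfl
  · simp [pvLoopA, hv]

theorem pvDropWhile_head_ne (u : String) : ∀ (l : List String),
    (l.dropWhile (fun x => x == u)) = [] ∨
    ∃ v d', (l.dropWhile (fun x => x == u)) = v :: d' ∧ v ≠ u := by
  intro l
  induction l with
  | nil => left; rfl
  | cons x l' ih =>
    by_cases h : x = u
    · simpa [List.dropWhile, h] using ih
    · right
      exact ⟨x, l', by simp [h], h⟩

-- main: A's loop equals B's run scan, for any accumulator m
theorem pvKey (root : String) : ∀ (n : Nat) (users : List String), users.length ≤ n →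
    ∀ m : Int, pvLoopA root m 0 users = pvBestRuns root users m := by
  intro n
  induction n with
  | zero =>
    intro users h m
    match users with
    | [] => rw [pvBestRuns]; rfl
    | _ :: _ => simp at h
  | succ n ih =>
    intro users h m
    match users with
    | [] => rw [pvBestRuns]; rfl
    | u :: rest =>
      have hrest : rest.length ≤ n := Nat.le_of_succ_le_succ (by simpa using h)
      have hsplit : rest.takeWhile (fun x => x == u) ++ rest.dropWhile (fun x => x == u) = rest :=
        List.takeWhile_append_dropWhile
      have hall : ∀ x ∈ rest.takeWhile (fun x => x == u), x = u := fun x hx => by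
        simpa using List.mem_takeWhile_imp hx
      have hlen : (rest.dropWhile (fun x => x == u)).length ≤ n :=
        le_trans (List.length_dropWhile_le _ _) hrest
      have hhead := pvDropWhile_head_ne u rest
      rw [pvBestRuns]
      by_cases hu : u = root
      · -- root run
        have hLHS : pvLoopA root m 0 (u :: rest) = pvLoopA root (max m 1) 1 rest := by
          simp [pvLoopA, hu]
        rw [hLHS, ← hsplit]
        have hallr : ∀ x ∈ rest.takeWhile (fun x => x == u), x = root := fun x hx =>
          (hall x hx).trans hu
        rw [pvLoopA_run_root root _ hallr m 1 _]
        have hreset : (rest.dropWhile (fun x => x == u)) = [] ∨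
            ∃ v d', (rest.dropWhile (fun x => x == u)) = v :: d' ∧ v ≠ root := by
          rcases hhead with h0 | ⟨v, d', he, hv⟩
          · exact Or.inl h0
          · exact Or.inr ⟨v, d', he, by rw [← hu]; exact hv⟩
        rw [pvLoopA_reset root _ hreset]
        rw [ih _ hlen]
        simp [hu]
      · -- non-root run
        have hLHS : pvLoopA root m 0 (u :: rest) = pvLoopA root m 0 rest := by
          simp [pvLoopA, hu]
        rw [hLHS, ← hsplit]
        have hallnr : ∀ x ∈ rest.takeWhile (fun x => x == u), x ≠ root := fun x hx => by
          rw [hall x hx]; exact hu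
        rw [pvLoopA_run_skip root _ hallnr m _]
        rw [ih _ hlen]
        simp [hu]

-- ===== VERDICT (by name: the statement is the Claim_ definition above) =====
theorem count_consecutive_self_tweets_spec : Claim_equal_count_consecutive_self_tweets := by
  intro td tt _
  unfold Spec_count_consecutive_self_tweets
  match td with
  | [] => rfl
  | t0 :: rest =>
    show (((t0 :: rest).foldl (fun (st : Int × Int) tweet_id =>
        if pvUserA tt tweet_id = pvUserA tt t0 then (max st.1 (st.2 + 1), st.2 + 1)
        else (st.1, 0)) ((0 : Int), (0 : Int))).1
      = pvBestRuns (pvUserB tt t0) ((t0 :: rest).map (pvUserB tt)) 0)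
    have hAB : pvUserB tt = pvUserA tt := funext fun _ => rfl
    have hmap : ((t0 :: rest).map (pvUserA tt)).foldl
        (fun (st : Int × Int) u => if u = pvUserA tt t0 then (max st.1 (st.2 + 1), st.2 + 1) else (st.1, 0))
        ((0 : Int), (0 : Int))
        = (t0 :: rest).foldl (fun (st : Int × Int) tweet_id =>
            if pvUserA tt tweet_id = pvUserA tt t0 then (max st.1 (st.2 + 1), st.2 + 1)
            else (st.1, 0)) ((0 : Int), (0 : Int)) := List.foldl_map
    rw [hAB, ← hmap, pvFoldl_eq_loopA]
    exact pvKey (pvUserA tt t0) _ _ (le_refl _) 0
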